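-- pv_equiv track=rewrite | github.com/DominoWw/EDA | DyV.py | nm5
-- ===== SOURCE A (Python) =====
-- def nm5(L:list)->int:
--     if L and len(L)==1:
--         if L[0]%5==0:
--             return L[0]
--         else:
--             return 0
--
--     if L and len(L)>1:
--         m=len(L)//2
--         left=L[m:]
--         right=L[:m]
--         return nm5(left) + nm5(right)
-- ===== SOURCE B (Python) =====
-- def nm5(L: list) -> int:
--     return sum(x for x in L if x % 5 == 0)
-- ===== Notes on version B (the rewrite author's own statement) =====
-- stated objective: faster
-- what changed: Replaced the divide-and-conquer recursion (which copies both slices at every level, O(n log n)) with a single O(n) pass summing the elements divisible by 5.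
-- outside the precondition, e.g. on nm5([]): A returns None, B returns 0
import Mathlib
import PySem

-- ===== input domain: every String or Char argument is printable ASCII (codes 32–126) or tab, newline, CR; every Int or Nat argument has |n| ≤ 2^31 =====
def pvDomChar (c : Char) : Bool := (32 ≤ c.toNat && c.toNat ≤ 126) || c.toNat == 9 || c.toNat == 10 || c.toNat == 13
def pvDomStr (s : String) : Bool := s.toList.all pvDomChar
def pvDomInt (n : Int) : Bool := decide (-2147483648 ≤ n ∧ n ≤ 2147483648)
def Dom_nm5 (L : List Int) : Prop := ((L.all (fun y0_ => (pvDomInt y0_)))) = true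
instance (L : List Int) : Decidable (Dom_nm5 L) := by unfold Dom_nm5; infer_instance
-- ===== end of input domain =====

-- B replaces A's halve-and-recurse summation with a single-pass sum (simpler decomposition).
-- A returns None (no int) on the empty list, so Pre_ excludes it.

-- ===== PORT A =====
-- A: recursive divide and conquer; on [] it falls through both guards (Python returns None),
-- that case is excluded by Pre_nm5 (the Lean port returns 0 there, unreached under Pre_).
def nm5 (L : List Int) : Int :=
  if L ≠ [] ∧ L.length = 1 then
    -- L[0]: index 0 is in range since len = 1
    let x := (PySem.List.pyGet? L 0).getD 0
    if PySem.Int.mod x 5 = 0 then x else 0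
  else if L ≠ [] ∧ L.length > 1 then
    let m := PySem.Int.floordiv (L.length : Int) 2
    let left := PySem.List.slice L (some m) none
    let right := PySem.List.slice L none (some m)
    nm5 left + nm5 right
  else 0
termination_by L.length
decreasing_by
  all_goals
    rename_i h1 h2
    clear h1
    have hm : PySem.Int.floordiv (L.length : Int) 2 = ((L.length / 2 : Nat) : Int) := by
      exact_mod_cast PySem.Int.floordiv_natCast L.length 2
    simp only [hm, PySem.List.slice_from_natCast, PySem.List.slice_to_natCast,
      List.length_drop, List.length_take]
    omega

-- ===== PORT B =====
def nm5_alt (L : List Int) : Int :=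
  (L.filter (fun x => PySem.Int.mod x 5 = 0)).sum

-- ===== PRECONDITION & SPEC =====
-- Pre_ excludes only the empty list, where Python A returns None (no value of the declared int type).
def Pre_nm5 (L : List Int) : Prop := L ≠ []
instance (L : List Int) : Decidable (Pre_nm5 L) := by unfold Pre_nm5; infer_instance
def pvWitness_nm5 : List Int := [5, 3, 10]

def Spec_nm5 (L : List Int) (out : Int) : Prop := out = nm5_alt L
instance (L : List Int) (out : Int) : Decidable (Spec_nm5 L out) := by unfold Spec_nm5; infer_instance

-- ===== CLAIM (what is proved, stated in full; the proofs are below) =====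
def Claim_equal_nm5 : Prop := ∀ (L : List Int), Dom_nm5 L → Pre_nm5 L → Spec_nm5 L (nm5 L)

-- ===== LEMMAS AND PROOFS =====

theorem nm5_alt_append (xs ys : List Int) : nm5_alt (xs ++ ys) = nm5_alt xs + nm5_alt ys := by
  simp [nm5_alt, List.filter_append]

theorem nm5_eq_alt (L : List Int) : nm5 L = nm5_alt L := by
  induction hL : L.length using Nat.strong_induction_on generalizing L with
  | _ n ih =>
    subst hL
    rw [nm5]
    by_cases h1 : L ≠ [] ∧ L.length = 1
    · obtain ⟨x, rfl⟩ : ∃ x, L = [x] := by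
        match L, h1.2 with | [x], _ => exact ⟨x, rfl⟩
      simp [nm5_alt, PySem.List.pyGet?, PySem.List.pyIdx?]
      split_ifs <;> simp_all
    · simp only [if_neg h1]
      by_cases h2 : L ≠ [] ∧ L.length > 1
      · simp only [if_pos h2]
        have hm : PySem.Int.floordiv (L.length : Int) 2 = ((L.length / 2 : Nat) : Int) := by
          exact_mod_cast PySem.Int.floordiv_natCast L.length 2
        simp only [hm, PySem.List.slice_from_natCast, PySem.List.slice_to_natCast]
        have hd : (L.drop (L.length / 2)).length < L.length := by
          simp [List.length_drop]; omega
        have ht : (L.take (L.length / 2)).length < L.length := by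
          simp [List.length_take]; omega
        rw [ih _ hd _ rfl, ih _ ht _ rfl, ← nm5_alt_append]
        -- drop ++ take is a permutation of L; sums of filters agree
        have : (List.drop (L.length / 2) L ++ List.take (L.length / 2) L).Perm L :=
          List.perm_append_comm.trans (by rw [List.take_append_drop])
        simp only [nm5_alt]
        exact (this.filter _).sum_eq
      · simp only [if_neg h2]
        have hlen : L.length = 0 := by
          by_contra h0
          by_cases he : L = []
          · exact h0 (by simp [he])
          · rcases Nat.lt_or_ge L.length 2 with hl | hl
            · exact h1 ⟨he, by omega⟩
            · exact h2 ⟨he, by omega⟩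
        have : L = [] := List.eq_nil_of_length_eq_zero hlen
        simp [this, nm5_alt]

-- ===== VERDICT (by name: the statement is the Claim_ definition above) =====
theorem nm5_spec : Claim_equal_nm5 := by
  intro L _ _
  unfold Spec_nm5
  exact nm5_eq_alt L
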